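-- pv_equiv track=rewrite | github.com/DieHard073055/musical-dollop | src/itunes_playlist_parser.py | get_duplicate_tracks
-- ===== SOURCE A (Python) =====
-- from typing import List, Dict, Any
--
-- def get_duplicate_tracks(tracks: List[Dict[str, Any]]) -> List[List[Dict[str, Any]]]:
--     track_duplicates_counter = dict()
--     duplicates = []
--     for track_id, track in tracks.items():
--         if track["Name"] not in track_duplicates_counter.keys():
--             track_duplicates_counter[track["Name"]] = []
--         track_duplicates_counter[track["Name"]].append(track_id)
--     duplicates = [
--         track_ids
--         for track_name, track_ids in track_duplicates_counter.items()
--         if len(track_ids) > 1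
--     ]
--
--     return duplicates
-- ===== SOURCE B (Python) =====
-- from typing import List, Dict, Any
--
-- def get_duplicate_tracks(tracks: List[Dict[str, Any]]) -> List[List[Dict[str, Any]]]:
--     counts = {}
--     for track in tracks.values():
--         counts[track["Name"]] = counts.get(track["Name"], 0) + 1
--     groups = {}
--     for track_id, track in tracks.items():
--         name = track["Name"]
--         if counts[name] > 1:
--             groups.setdefault(name, []).append(track_id)
--     return list(groups.values())
-- ===== Notes on version B (the rewrite author's own statement) =====
-- stated objective: alternative
-- what changed: Instead of building one name->ids table and filtering it at the end, B makes a counting pass (name occurrence counts) and then a second pass that only collects ids whose name count exceeds 1, returning the grouped values directly.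
import Mathlib
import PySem

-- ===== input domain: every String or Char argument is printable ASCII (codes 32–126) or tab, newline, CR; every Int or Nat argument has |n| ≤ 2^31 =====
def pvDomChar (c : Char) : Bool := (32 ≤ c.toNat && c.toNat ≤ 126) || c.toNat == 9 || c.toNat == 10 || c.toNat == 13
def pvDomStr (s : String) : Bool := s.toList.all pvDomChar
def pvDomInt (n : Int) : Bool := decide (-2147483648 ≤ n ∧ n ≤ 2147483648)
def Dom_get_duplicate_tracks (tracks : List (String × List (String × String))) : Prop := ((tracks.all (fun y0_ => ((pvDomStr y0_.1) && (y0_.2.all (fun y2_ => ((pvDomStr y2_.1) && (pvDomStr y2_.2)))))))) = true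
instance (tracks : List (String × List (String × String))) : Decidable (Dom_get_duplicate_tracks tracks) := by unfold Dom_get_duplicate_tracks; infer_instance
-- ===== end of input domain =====

-- B replaces A's build-the-whole-name->ids-table-then-filter pass by a counting pass plus a second
-- pass that only collects ids of names occurring more than once (alternative decomposition, same cost).

-- track["Name"] on the inner dict (Python dict lookup; KeyError — "Name" absent — is excluded by
-- Pre_, where this total version returns "")
def trackName (t : List (String × String)) : String := (PySem.Dict.ofList t).getD "Name" ""

-- ===== PORT A =====
def get_duplicate_tracks (tracks : List (String × List (String × String))) : List (List String) :=
  let counter : PySem.Dict String (List String) :=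
    tracks.foldl (fun d p =>
      let name := trackName p.2
      let d' := if d.contains name then d else d.insert name []
      d'.modify name [] (fun l => l ++ [p.1])) PySem.Dict.empty
  (counter.items.filter (fun q => decide (1 < q.2.length))).map (fun q => q.2)

-- ===== PORT B =====
def get_duplicate_tracks_alt (tracks : List (String × List (String × String))) : List (List String) :=
  let counts : PySem.Dict String Int :=
    tracks.foldl (fun c p =>
      let name := trackName p.2
      c.insert name (c.getD name 0 + 1)) PySem.Dict.empty
  let groups : PySem.Dict String (List String) :=
    tracks.foldl (fun g p =>
      let name := trackName p.2
      if 1 < counts.getD name 0 then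
        (g.setdefault name []).modify name [] (fun l => l ++ [p.1])
      else g) PySem.Dict.empty
  groups.values

-- ===== PRECONDITION & SPEC =====
-- Pre_ excludes tracks whose inner dict lacks a "Name" key (A raises KeyError there), and association
-- lists with duplicate track ids, which a Python dict argument cannot represent (duplicates collapse
-- before A ever runs).
def Pre_get_duplicate_tracks (tracks : List (String × List (String × String))) : Prop :=
  (tracks.map (fun p => p.1)).Nodup ∧ ∀ p ∈ tracks, "Name" ∈ p.2.map (fun q => q.1)
instance (tracks : List (String × List (String × String))) : Decidable (Pre_get_duplicate_tracks tracks) := by unfold Pre_get_duplicate_tracks; infer_instance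

def pvWitness_get_duplicate_tracks : (List (String × List (String × String))) :=
  [("1", [("Name", "a")]), ("2", [("Name", "a")]), ("3", [("Name", "b")])]

def Spec_get_duplicate_tracks (tracks : List (String × List (String × String))) (out : List (List String)) : Prop := out = get_duplicate_tracks_alt tracks
instance (tracks : List (String × List (String × String))) (out : List (List String)) : Decidable (Spec_get_duplicate_tracks tracks out) := by unfold Spec_get_duplicate_tracks; infer_instance

-- ===== CLAIM (what is proved, stated in full; the proofs are below) =====
def Claim_equal_get_duplicate_tracks : Prop := ∀ (tracks : List (String × List (String × String))), Dom_get_duplicate_tracks tracks → Pre_get_duplicate_tracks tracks → Spec_get_duplicate_tracks tracks (get_duplicate_tracks tracks)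

-- ===== LEMMAS AND PROOFS =====

-- the ids grouped under a name, in input order (the common characterisation of both ports)
def idsOf (tracks : List (String × List (String × String))) (k : String) : List String :=
  (tracks.filter (fun p => trackName p.2 == k)).map (fun p => p.1)

theorem groupFold_getD (tracks : List (String × List (String × String))) (k : String) :
    (tracks.foldl (fun d p => d.modify (trackName p.2) [] (fun l => l ++ [p.1]))
      PySem.Dict.empty).getD k [] = idsOf tracks k := by
  rw [← List.foldl_map (f := fun p : String × List (String × String) => (trackName p.2, p.1))
        (g := fun d (q : String × String) => PySem.Dict.modify d q.1 [] (fun l => l ++ [q.2]))]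
  rw [PySem.Dict.getD_foldl_modify_append, PySem.Dict.getD_empty]
  rw [List.filter_map, List.map_map]
  simp [idsOf, Function.comp_def]

theorem groupFold_keys (tracks : List (String × List (String × String))) :
    (tracks.foldl (fun d p => d.modify (trackName p.2) [] (fun l => l ++ [p.1]))
      PySem.Dict.empty).keys = PySem.Set.ofList (tracks.map (fun p => trackName p.2)) := by
  have h := PySem.Dict.keys_foldl_modify_key tracks (fun p => trackName p.2) ([] : List String)
      (fun _ p l => l ++ [p.1]) PySem.Dict.empty
  simp only [] at h
  rw [h, PySem.Dict.keys_empty, PySem.Set.update_nil_left]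

theorem groupFold_nodup (tracks : List (String × List (String × String))) :
    (tracks.foldl (fun d p => d.modify (trackName p.2) [] (fun l => l ++ [p.1]))
      PySem.Dict.empty).keys.Nodup :=
  PySem.Dict.nodup_keys_foldl_modify_key tracks (fun p => trackName p.2) []
      (fun _ p l => l ++ [p.1]) PySem.Dict.empty PySem.Dict.nodup_keys_empty

theorem counts_getD (tracks : List (String × List (String × String))) (k : String) :
    (tracks.foldl (fun c p => c.insert (trackName p.2) (c.getD (trackName p.2) 0 + 1))
      PySem.Dict.empty).getD k 0 = ((idsOf tracks k).length : Int) := by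
  rw [← List.foldl_map (f := fun p : String × List (String × String) => trackName p.2)
        (g := fun (c : PySem.Dict String Int) x => c.insert x (c.getD x 0 + 1))]
  rw [PySem.Dict.getD_foldl_insert_add_one, PySem.Dict.getD_empty]
  simp only [List.count_eq_countP, List.countP_map]
  simp [idsOf, List.countP_eq_length_filter, Function.comp_def]

theorem a_step (d : PySem.Dict String (List String)) (name : String) (x : String) :
    (if d.contains name then d else d.insert name []).modify name [] (fun l => l ++ [x])
      = d.modify name [] (fun l => l ++ [x]) := by
  by_cases h : d.contains name = true
  · simp [h]
  · simp only [Bool.not_eq_true] at h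
    simp [h, PySem.Dict.modify, PySem.Dict.getD_insert_self, PySem.Dict.insert_insert_self,
      PySem.Dict.getD_of_not_contains (h := h)]

theorem A_char (tracks : List (String × List (String × String))) :
    get_duplicate_tracks tracks =
      ((PySem.Set.ofList (tracks.map (fun p => trackName p.2))).filter
        (fun k => decide (1 < (idsOf tracks k).length))).map (fun k => idsOf tracks k) := by
  have hstep : (fun (d : PySem.Dict String (List String)) (p : String × List (String × String)) =>
        let name := trackName p.2
        let d' := if d.contains name then d else d.insert name []
        d'.modify name [] (fun l => l ++ [p.1]))
      = (fun d p => d.modify (trackName p.2) [] (fun l => l ++ [p.1])) := by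
    funext d p; exact a_step d (trackName p.2) p.1
  simp only [get_duplicate_tracks, hstep]
  rw [PySem.Dict.items_eq_map_keys _ (groupFold_nodup tracks) []]
  rw [List.filter_map, List.map_map]
  rw [groupFold_keys]
  simp only [groupFold_getD, Function.comp_def]

theorem b_step (g : PySem.Dict String (List String)) (name : String) (x : String) :
    (g.setdefault name []).modify name [] (fun l => l ++ [x])
      = g.modify name [] (fun l => l ++ [x]) := by
  by_cases h : g.contains name = true
  · rw [PySem.Dict.setdefault_of_contains (h := h)]
  · simp only [Bool.not_eq_true] at h
    rw [PySem.Dict.setdefault_of_not_contains (h := h)]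
    simp [PySem.Dict.modify, PySem.Dict.getD_insert_self, PySem.Dict.insert_insert_self,
      PySem.Dict.getD_of_not_contains (h := h)]

theorem B_char (tracks : List (String × List (String × String))) :
    get_duplicate_tracks_alt tracks =
      (PySem.Set.ofList ((tracks.filter
          (fun p => decide (1 < (idsOf tracks (trackName p.2)).length))).map
            (fun p => trackName p.2))).map
        (fun k => idsOf (tracks.filter
          (fun p => decide (1 < (idsOf tracks (trackName p.2)).length))) k) := by
  have hstep : (fun (g : PySem.Dict String (List String)) (p : String × List (String × String)) =>
        if 1 < (idsOf tracks (trackName p.2)).length then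
          (g.setdefault (trackName p.2) []).modify (trackName p.2) [] (fun l => l ++ [p.1])
        else g)
      = (fun g p => if (fun p => decide (1 < (idsOf tracks (trackName p.2)).length)) p = true then
          g.modify (trackName p.2) [] (fun l => l ++ [p.1]) else g) := by
    funext g p
    simp only [decide_eq_true_eq]
    split_ifs with h
    · exact b_step g (trackName p.2) p.1
    · rfl
  simp only [get_duplicate_tracks_alt]
  simp only [counts_getD, Nat.one_lt_cast]
  rw [hstep, ← List.foldl_filter]
  rw [PySem.Dict.values_eq_map_keys _ (groupFold_nodup _) []]
  rw [groupFold_keys]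
  simp only [groupFold_getD]

-- ordered dedup commutes with filter
theorem ofList_filter {α : Type} [BEq α] [LawfulBEq α] (p : α → Bool) (l : List α) :
    PySem.Set.ofList (l.filter p) = (PySem.Set.ofList l).filter p := by
  induction l using List.reverseRecOn with
  | nil => rfl
  | append_singleton xs x ih =>
    rw [List.filter_append, PySem.Set.ofList_append_singleton]
    by_cases hp : p x = true
    · simp only [List.filter_cons, hp, List.filter_nil, if_true]
      rw [PySem.Set.ofList_append_singleton, ih]
      by_cases hm : x ∈ PySem.Set.ofList xs
      · rw [PySem.Set.add_of_mem hm, PySem.Set.add_of_mem]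
        simp [List.mem_filter, hm, hp]
      · rw [PySem.Set.add_of_not_mem hm, PySem.Set.add_of_not_mem, List.filter_append]
        · simp [hp]
        · simp [List.mem_filter, hm]
    · simp only [List.filter_cons, hp, List.filter_nil, List.append_nil, Bool.false_eq_true,
        ite_false]
      rw [ih]
      by_cases hm : x ∈ PySem.Set.ofList xs
      · rw [PySem.Set.add_of_mem hm]
      · rw [PySem.Set.add_of_not_mem hm, List.filter_append]
        simp [hp]

theorem a_eq_b (tracks : List (String × List (String × String))) :
    get_duplicate_tracks tracks = get_duplicate_tracks_alt tracks := by
  rw [A_char, B_char]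
  rw [show (fun p : String × List (String × String) =>
        decide (1 < (idsOf tracks (trackName p.2)).length))
      = ((fun k => decide (1 < (idsOf tracks k).length)) ∘ (fun p => trackName p.2)) from rfl]
  rw [← List.filter_map, ofList_filter]
  apply List.map_congr_left
  intro k hk
  rw [List.mem_filter] at hk
  have hlen : 1 < (idsOf tracks k).length := by simpa using hk.2
  unfold idsOf
  rw [List.filter_filter]
  congr 1
  apply List.filter_congr
  intro a _
  by_cases hb : trackName a.2 == k
  · have heq : trackName a.2 = k := eq_of_beq hb
    simp only [Function.comp_apply, heq]
    simpa [idsOf] using hlen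
  · simp [hb]

-- ===== VERDICT (by name: the statement is the Claim_ definition above) =====
theorem get_duplicate_tracks_spec : Claim_equal_get_duplicate_tracks := by
  intro tracks _ _
  unfold Spec_get_duplicate_tracks
  exact a_eq_b tracks
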